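-- pv_equiv track=rewrite | github.com/CompendiumLabs/ziggy | ziggy/server.py | buffer_stream
-- ===== SOURCE A (Python) =====
-- def buffer_stream(stream, min_size):
--     buf = []
--     for item in stream:
--         buf.append(item)
--         if len(buf) >= min_size:
--             yield buf
--             buf = []
--     if len(buf) > 0:
--         yield buf
-- ===== SOURCE B (Python) =====
-- def buffer_stream(stream, min_size):
--     # slice-based chunking: take blocks of k = max(min_size, 1) items at a time
--     items = list(stream)
--     k = max(min_size, 1)
--     while items:
--         yield items[:k]
--         items = items[k:]
-- ===== Notes on version B (the rewrite author's own statement) =====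
-- stated objective: idiomatic
-- what changed: B chunks by list slicing in blocks of k = max(min_size, 1) instead of appending item by item with a length guard and a trailing post-loop yield; the partial final batch and the min_size <= 0 singleton behaviour fall out of the same slice loop.
import Mathlib
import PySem

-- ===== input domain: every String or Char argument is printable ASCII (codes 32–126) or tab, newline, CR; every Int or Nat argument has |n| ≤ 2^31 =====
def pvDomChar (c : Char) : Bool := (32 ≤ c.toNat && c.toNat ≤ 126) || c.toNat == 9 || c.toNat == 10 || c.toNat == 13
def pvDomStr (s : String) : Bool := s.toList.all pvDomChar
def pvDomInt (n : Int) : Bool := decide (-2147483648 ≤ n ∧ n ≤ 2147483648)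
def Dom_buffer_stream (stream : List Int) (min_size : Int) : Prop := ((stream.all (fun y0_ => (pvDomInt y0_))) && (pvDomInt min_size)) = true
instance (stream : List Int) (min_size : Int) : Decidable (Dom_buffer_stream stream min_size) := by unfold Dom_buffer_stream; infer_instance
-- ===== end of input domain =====

-- B chunks the list by repeated slicing into blocks of k = max(min_size, 1) instead of
-- A's item-by-item accumulator with a length guard and trailing yield (idiomatic; same cost).
-- A and B are generators in Python; ported as the list of yielded batches.


-- ===== PORT A =====
-- loop over the stream with accumulator buf; yield buf when len(buf) >= min_size; trailing yield
def bufStreamGoA (m : Int) : List Int → List Int → List (List Int)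
  | [], buf => if buf.length > 0 then [buf] else []
  | x :: xs, buf =>
      let b := buf ++ [x]
      if (b.length : Int) ≥ m then b :: bufStreamGoA m xs [] else bufStreamGoA m xs b

def buffer_stream (stream : List Int) (min_size : Int) : List (List Int) :=
  bufStreamGoA min_size stream []

-- ===== PORT B =====
-- while items: yield items[:k]; items = items[k:]   with k = max(min_size, 1) ≥ 1.
-- items[:k] = take k and items[k:] = drop k for k ≥ 1 (exact for nonnegative slice bounds);
-- k is carried as kp = k - 1 (a Nat). The while loop is a recursion on the shrinking list,
-- written with a fuel counter (initial fuel = the list's length, which always suffices since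
-- each step consumes at least one element) so the recursion is structural.
def bufStreamGoB (kp : Nat) : Nat → List Int → List (List Int)
  | _, [] => []
  | 0, _ :: _ => []          -- fuel exhausted: never reached when fuel ≥ the list's length
  | fuel + 1, x :: xs => ((x :: xs).take (kp + 1)) :: bufStreamGoB kp fuel (xs.drop kp)

def buffer_stream_alt (stream : List Int) (min_size : Int) : List (List Int) :=
  bufStreamGoB ((max min_size 1).toNat - 1) stream.length stream

-- ===== PRECONDITION & SPEC =====
def Spec_buffer_stream (stream : List Int) (min_size : Int) (out : List (List Int)) : Prop := out = buffer_stream_alt stream min_size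
instance (stream : List Int) (min_size : Int) (out : List (List Int)) : Decidable (Spec_buffer_stream stream min_size out) := by unfold Spec_buffer_stream; infer_instance

-- ===== CLAIM (what is proved, stated in full; the proofs are below) =====
def Claim_equal_buffer_stream : Prop := ∀ (stream : List Int) (min_size : Int), Dom_buffer_stream stream min_size → Spec_buffer_stream stream min_size (buffer_stream stream min_size)

-- ===== LEMMAS AND PROOFS =====

-- the fuel is irrelevant as long as it covers the list's length
theorem goB_fuel_eq (kp : Nat) : ∀ (f₁ : Nat), ∀ (f₂ : Nat) (l : List Int),
    l.length ≤ f₁ → l.length ≤ f₂ → bufStreamGoB kp f₁ l = bufStreamGoB kp f₂ l := by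
  intro f₁
  induction f₁ with
  | zero =>
      intro f₂ l h1 _
      cases l with
      | nil => cases f₂ <;> simp [bufStreamGoB]
      | cons x xs => simp at h1
  | succ g ih =>
      intro f₂ l h1 h2
      cases l with
      | nil => cases f₂ <;> simp [bufStreamGoB]
      | cons x xs =>
          cases f₂ with
          | zero => simp at h2
          | succ h =>
              simp only [bufStreamGoB]
              rw [ih h (xs.drop kp) (by simp at h1 ⊢; omega) (by simp at h2 ⊢; omega)]

-- a full block peels off the front of B's chunking
theorem bufStreamGoB_append (kp : Nat) (b xs : List Int) (hb : b.length = kp + 1) :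
    bufStreamGoB kp (b ++ xs).length (b ++ xs) = b :: bufStreamGoB kp xs.length xs := by
  cases b with
  | nil => simp at hb
  | cons y ys =>
      have hys : ys.length = kp := by simpa using hb
      subst hys
      simp only [List.cons_append, List.length_cons, bufStreamGoB]
      rw [List.take_succ_cons, List.take_left, List.drop_left,
        goB_fuel_eq _ _ xs.length xs (by simp) (by simp)]

-- invariant: with buf shorter than a full block, A's loop from state buf equals B's chunking of buf ++ l
theorem goA_eq_goB (m : Int) (kp : Nat) (hk : (kp : Int) + 1 = max m 1) :
    ∀ (l buf : List Int), buf.length ≤ kp →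
      bufStreamGoA m l buf = bufStreamGoB kp (buf ++ l).length (buf ++ l) := by
  intro l
  induction l with
  | nil =>
      intro buf hbuf
      cases buf with
      | nil => simp [bufStreamGoA, bufStreamGoB]
      | cons y ys =>
          have h2 : ys.length ≤ kp := by simp at hbuf; omega
          have h1 : ys.drop kp = [] := List.drop_eq_nil_of_le h2
          simp [bufStreamGoA, bufStreamGoB, h1, List.take_of_length_le, h2]
  | cons x xs ih =>
      intro buf hbuf
      by_cases hc : ((buf ++ [x]).length : Int) ≥ m
      · have hfull : (buf ++ [x]).length = kp + 1 := by
          simp at hc ⊢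
          omega
        have : bufStreamGoA m (x :: xs) buf = (buf ++ [x]) :: bufStreamGoA m xs [] := by
          simp only [bufStreamGoA]
          rw [if_pos hc]
        rw [this, ih [] (by simp)]
        have h2 : buf ++ x :: xs = (buf ++ [x]) ++ xs := by simp
        rw [h2, bufStreamGoB_append kp (buf ++ [x]) xs hfull]
        simp
      · have hlt : (buf ++ [x]).length ≤ kp := by
          simp at hc ⊢
          omega
        have : bufStreamGoA m (x :: xs) buf = bufStreamGoA m xs (buf ++ [x]) := by
          simp only [bufStreamGoA]
          rw [if_neg hc]
        rw [this, ih (buf ++ [x]) hlt]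
        simp

-- ===== VERDICT (by name: the statement is the Claim_ definition above) =====
theorem buffer_stream_spec : Claim_equal_buffer_stream := by
  intro stream min_size _
  unfold Spec_buffer_stream buffer_stream buffer_stream_alt
  have hk : (((max min_size 1).toNat - 1 : Nat) : Int) + 1 = max min_size 1 := by
    have h1 : (1 : Int) ≤ max min_size 1 := le_max_right _ _
    omega
  simpa using goA_eq_goB min_size ((max min_size 1).toNat - 1) hk stream [] (by simp)
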